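-- pv_equiv track=rewrite | github.com/CHAITANYA-IN/cryptography-network-security-assignments | Caesar Cipher/encrypt.py | cipherFormatter
-- ===== SOURCE A (Python) =====
-- def cipherFormatter(cipher: list, blockSize: int, lineBlocks: int) -> str:
--   cipherText = ''
--   blocks = 0
--   for index, C in enumerate(cipher):
--     if((index + 1) % blockSize):
--       cipherText += C
--     else:
--       blocks += 1
--       if(blocks % lineBlocks):
--         cipherText += C + ' '
--       else:
--         cipherText += C + '\n'
--   return cipherText
-- ===== SOURCE B (Python) =====
-- def cipherFormatter(cipher: list, blockSize: int, lineBlocks: int) -> str: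
--   pieces = []
--   block_no = 0
--   rest = list(cipher)
--   while rest:
--     block, rest = rest[:blockSize], rest[blockSize:]
--     pieces.append(''.join(block))
--     if len(block) == blockSize:
--       block_no += 1
--       pieces.append('\n' if block_no % lineBlocks == 0 else ' ')
--   return ''.join(pieces)
-- ===== Notes on version B (the rewrite author's own statement) =====
-- stated objective: alternative
-- what changed: B slices the input into whole blocks with a while-loop and joins a list of pieces with one separator decision per block, instead of A's per-character loop testing (index+1) % blockSize on every element; Pre_ excludes the inputs where A raises ZeroDivisionError (blockSize 0, or lineBlocks 0 once a block completes) and, as outside the natural domain of a block size, nonpositive blockSize with a nonempty list, where A's grouping via Python's signed modulo is accidental and B's slicing loop does not terminate.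
-- outside the precondition, e.g. on cipherFormatter(['a', 'b'], -2, 3): A returns 'ab ', B does not finish within the time limit
import Mathlib
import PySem

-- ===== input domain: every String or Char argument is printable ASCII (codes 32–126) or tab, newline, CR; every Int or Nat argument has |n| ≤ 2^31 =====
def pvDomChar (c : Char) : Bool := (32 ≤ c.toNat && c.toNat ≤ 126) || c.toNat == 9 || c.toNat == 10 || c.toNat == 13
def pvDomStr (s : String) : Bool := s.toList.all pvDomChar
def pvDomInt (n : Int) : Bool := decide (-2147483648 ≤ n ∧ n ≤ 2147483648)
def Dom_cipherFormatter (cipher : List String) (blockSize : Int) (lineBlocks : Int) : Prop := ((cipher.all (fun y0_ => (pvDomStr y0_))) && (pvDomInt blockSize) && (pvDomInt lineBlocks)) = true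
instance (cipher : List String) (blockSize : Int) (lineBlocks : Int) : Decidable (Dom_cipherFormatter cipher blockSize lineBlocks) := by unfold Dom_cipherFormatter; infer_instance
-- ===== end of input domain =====

-- B chunks the list into blocks with a slicing while-loop and joins pieces (alternative decomposition, same values as A on Pre_).

-- ===== PORT A =====
-- per-element loop over enumerate(cipher), state = (cipherText, blocks)
def cipherFormatter (cipher : List String) (blockSize : Int) (lineBlocks : Int) : String :=
  ((PySem.List.enumerate cipher).foldl
    (fun (st : String × Int) iC =>
      if PySem.Int.mod (iC.1 + 1) blockSize ≠ 0 then
        (st.1 ++ iC.2, st.2)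
      else
        let blocks := st.2 + 1
        if PySem.Int.mod blocks lineBlocks ≠ 0 then
          (st.1 ++ iC.2 ++ " ", blocks)
        else
          (st.1 ++ iC.2 ++ "\n", blocks))
    ("", 0)).1

-- ===== PORT B =====
-- the while-loop of Source B: block, rest = rest[:blockSize], rest[blockSize:]; fuel = initial
-- length (on Pre_ blockSize ≥ 1, so rest shrinks and fuel never runs out)
def cfAltLoop : Nat → List String → Int → Int → Int → List String
  | 0, _, _, _, _ => []
  | _ + 1, [], _, _, _ => []
  | fuel + 1, rest@(_ :: _), blockSize, blocks, lineBlocks =>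
    let block := PySem.List.slice rest none (some blockSize)
    let rest' := PySem.List.slice rest (some blockSize) none
    if (block.length : Int) = blockSize then
      let blocks' := blocks + 1
      String.join block ::
        (if PySem.Int.mod blocks' lineBlocks = 0 then "\n" else " ") ::
        cfAltLoop fuel rest' blockSize blocks' lineBlocks
    else
      String.join block :: cfAltLoop fuel rest' blockSize blocks lineBlocks

def cipherFormatter_alt (cipher : List String) (blockSize : Int) (lineBlocks : Int) : String :=
  String.join (cfAltLoop cipher.length cipher blockSize 0 lineBlocks)

-- ===== PRECONDITION & SPEC =====
-- Pre_ excludes the inputs where A raises ZeroDivisionError (blockSize = 0 with a nonempty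
-- list, or lineBlocks = 0 when the list is long enough to complete a block) and, as outside
-- the natural domain of a block size, negative blockSize with a nonempty list, where A's
-- grouping via Python's signed modulo is accidental and B's slicing loop does not terminate.
def Pre_cipherFormatter (cipher : List String) (blockSize : Int) (lineBlocks : Int) : Prop :=
  cipher = [] ∨ (1 ≤ blockSize ∧ (lineBlocks ≠ 0 ∨ (cipher.length : Int) < blockSize))
instance (cipher : List String) (blockSize : Int) (lineBlocks : Int) : Decidable (Pre_cipherFormatter cipher blockSize lineBlocks) := by unfold Pre_cipherFormatter; infer_instance

def pvWitness_cipherFormatter : List String × Int × Int := (["a", "b", "c", "d", "e"], 2, 2)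

def Spec_cipherFormatter (cipher : List String) (blockSize : Int) (lineBlocks : Int) (out : String) : Prop := out = cipherFormatter_alt cipher blockSize lineBlocks
instance (cipher : List String) (blockSize : Int) (lineBlocks : Int) (out : String) : Decidable (Spec_cipherFormatter cipher blockSize lineBlocks out) := by unfold Spec_cipherFormatter; infer_instance

-- ===== CLAIM (what is proved, stated in full; the proofs are below) =====
def Claim_equal_cipherFormatter : Prop := ∀ (cipher : List String) (blockSize : Int) (lineBlocks : Int), Dom_cipherFormatter cipher blockSize lineBlocks → Pre_cipherFormatter cipher blockSize lineBlocks → Spec_cipherFormatter cipher blockSize lineBlocks (cipherFormatter cipher blockSize lineBlocks)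

-- ===== LEMMAS AND PROOFS =====

-- A's loop body, named so the proofs can speak about it (definitionally the lambda in cipherFormatter)
def cfStep (blockSize lineBlocks : Int) (st : String × Int) (iC : Int × String) : String × Int :=
  if PySem.Int.mod (iC.1 + 1) blockSize ≠ 0 then
    (st.1 ++ iC.2, st.2)
  else
    let blocks := st.2 + 1
    if PySem.Int.mod blocks lineBlocks ≠ 0 then
      (st.1 ++ iC.2 ++ " ", blocks)
    else
      (st.1 ++ iC.2 ++ "\n", blocks)

theorem cipherFormatter_eq_foldl (cipher : List String) (blockSize lineBlocks : Int) :
    cipherFormatter cipher blockSize lineBlocks =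
      ((PySem.List.enumerate cipher).foldl (cfStep blockSize lineBlocks) ("", 0)).1 := rfl

theorem strFoldl_hoist (l : List String) (x : String) :
    l.foldl (· ++ ·) x = x ++ l.foldl (· ++ ·) "" := by
  induction l generalizing x with
  | nil => simp
  | cons a l ih =>
    simp only [List.foldl_cons]
    rw [ih (x ++ a), ih ("" ++ a), String.empty_append, String.append_assoc]

theorem join_cons (a : String) (l : List String) :
    String.join (a :: l) = a ++ String.join l := by
  simp only [String.join, List.foldl_cons, String.empty_append]
  exact strFoldl_hoist l a

theorem join_singleton (a : String) : String.join [a] = a := by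
  simp [String.join]

theorem join_append (l₁ l₂ : List String) :
    String.join (l₁ ++ l₂) = String.join l₁ ++ String.join l₂ := by
  induction l₁ with
  | nil => simp [String.join]
  | cons a l ih => simp only [List.cons_append, join_cons, ih, String.append_assoc]

theorem hit_iff (blockSize : Int) (n : Nat) :
    PySem.Int.mod (n : Int) blockSize = 0 ↔ blockSize.natAbs ∣ n := by
  rw [PySem.Int.mod_eq_zero_iff_dvd, ← Int.natAbs_dvd_natAbs, Int.natAbs_natCast]

theorem no_mid (s i m : Nat) (hdvd : s ∣ i) (h0 : 0 < m) (hm : m < s) : ¬ s ∣ i + m := by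
  intro h
  have hsm : s ∣ m := (Nat.dvd_add_right hdvd).mp h
  exact absurd (Nat.le_of_dvd h0 hsm) (by omega)

theorem fold_no_sep (blockSize lineBlocks : Int) (ys : List String) (i : Nat)
    (acc : String) (b : Int)
    (h : ∀ k, k < ys.length → ¬ blockSize.natAbs ∣ (i + k + 1)) :
    (PySem.List.enumerate ys (i : Int)).foldl (cfStep blockSize lineBlocks) (acc, b) =
      (acc ++ String.join ys, b) := by
  induction ys generalizing i acc with
  | nil => simp [PySem.List.enumerate_nil, String.join]
  | cons y ys ih =>
    rw [PySem.List.enumerate_cons, List.foldl_cons]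
    have hhit : ¬ blockSize.natAbs ∣ (i + 1) := by
      have := h 0 (by simp)
      simpa using this
    have hcond : PySem.Int.mod ((i : Int) + 1) blockSize ≠ 0 := by
      have : ((i : Int) + 1) = ((i + 1 : Nat) : Int) := by push_cast; ring
      rw [this, ne_eq, hit_iff]
      exact hhit
    have hstep : cfStep blockSize lineBlocks (acc, b) ((i : Int), y) = (acc ++ y, b) := by
      simp [cfStep, hcond]
    rw [hstep]
    have : ((i : Int) + 1) = (((i + 1 : Nat)) : Int) := by push_cast; ring
    rw [this, ih (i + 1) (acc ++ y) (fun k hk => by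
      have := h (k + 1) (by simpa using Nat.succ_lt_succ hk)
      convert this using 2
      omega)]
    rw [join_cons, String.append_assoc]

theorem fold_chunk (blockSize lineBlocks : Int) (ys : List String) (i : Nat)
    (acc : String) (b : Int)
    (hlen : ys.length = blockSize.natAbs) (hs : 1 ≤ blockSize.natAbs)
    (hdvd : blockSize.natAbs ∣ i) :
    (PySem.List.enumerate ys (i : Int)).foldl (cfStep blockSize lineBlocks) (acc, b) =
      (acc ++ String.join ys ++
        (if PySem.Int.mod (b + 1) lineBlocks = 0 then "\n" else " "), b + 1) := by
  rcases List.eq_nil_or_concat ys with hnil | ⟨front, z, hys⟩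
  · subst hnil; simp at hlen; omega
  · subst hys
    rw [List.concat_eq_append, PySem.List.enumerate_append, List.foldl_append]
    rw [List.length_concat] at hlen
    have hfront : front.length = blockSize.natAbs - 1 := by omega
    rw [fold_no_sep blockSize lineBlocks front i acc b (fun k hk => by
      rw [Nat.add_assoc]
      exact no_mid blockSize.natAbs i (k + 1) hdvd (by omega) (by omega))]
    rw [PySem.List.enumerate_cons, PySem.List.enumerate_nil, List.foldl_cons, List.foldl_nil]
    have hidx : ((i : Int) + (front.length : Int) + 1) = (((i + blockSize.natAbs : Nat)) : Int) := by
      rw [hfront]; omega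
    have hcond : ¬ PySem.Int.mod ((i : Int) + (front.length : Int) + 1) blockSize ≠ 0 := by
      simp only [hidx, ne_eq, hit_iff, not_not]
      exact Nat.dvd_add hdvd dvd_rfl
    simp only [cfStep, hcond, if_false]
    rw [join_append, join_cons]
    have hjz : String.join ([] : List String) = "" := rfl
    rw [hjz, String.append_empty]
    by_cases hmod : PySem.Int.mod (b + 1) lineBlocks = 0 <;>
      simp [hmod, String.append_assoc]

theorem fold_main (blockSize lineBlocks : Int) (hb : 1 ≤ blockSize) :
    ∀ (fuel : Nat) (rest : List String) (i : Nat) (acc : String) (b : Int),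
      rest.length ≤ fuel → blockSize.natAbs ∣ i →
      ((PySem.List.enumerate rest (i : Int)).foldl (cfStep blockSize lineBlocks) (acc, b)).1 =
        acc ++ String.join (cfAltLoop fuel rest blockSize b lineBlocks) := by
  obtain ⟨s, hcast⟩ : ∃ s : Nat, blockSize = (s : Int) :=
    ⟨blockSize.toNat, (Int.toNat_of_nonneg (by omega)).symm⟩
  have hsabs : blockSize.natAbs = s := by rw [hcast, Int.natAbs_natCast]
  have hs : 1 ≤ s := by omega
  intro fuel
  induction fuel with
  | zero =>
    intro rest i acc b hfuel _
    have : rest = [] := List.eq_nil_of_length_eq_zero (by omega)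
    subst this
    simp [PySem.List.enumerate_nil, cfAltLoop, String.join]
  | succ fuel ih =>
    intro rest i acc b hfuel hdvd
    match rest with
    | [] => simp [PySem.List.enumerate_nil, cfAltLoop, String.join]
    | x :: rs =>
      have h1 : PySem.List.slice (x :: rs) none (some blockSize) = (x :: rs).take s := by
        rw [hcast, PySem.List.slice_to_natCast]
      have h2 : PySem.List.slice (x :: rs) (some blockSize) none = (x :: rs).drop s := by
        rw [hcast, PySem.List.slice_from_natCast]
      rw [hsabs] at hdvd
      by_cases hlen : ((x :: rs).take s).length = s
      · -- complete block
        conv_lhs => rw [← List.take_append_drop s (x :: rs), PySem.List.enumerate_append,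
          List.foldl_append]
        rw [fold_chunk blockSize lineBlocks _ i acc b (by rw [hsabs]; exact hlen)
          (by omega) (by rw [hsabs]; exact hdvd)]
        have hidx : ((i : Int) + (((x :: rs).take s).length : Int)) = (((i + s : Nat)) : Int) := by
          rw [hlen]; push_cast; ring
        rw [hidx, ih ((x :: rs).drop s) (i + s) _ (b + 1)
          (by have h1' : ((x :: rs).drop s).length = (x :: rs).length - s := List.length_drop
              omega)
          (by rw [hsabs]; exact Nat.dvd_add hdvd dvd_rfl)]
        show _ = acc ++ String.join (cfAltLoop (fuel + 1) (x :: rs) blockSize b lineBlocks)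
        rw [cfAltLoop]
        simp only [h1, h2]
        have hcond : (((List.take s (x :: rs)).length : Int) = blockSize) := by
          rw [hcast]; exact_mod_cast hlen
        rw [if_pos hcond]
        rw [join_cons, join_cons, String.append_assoc, String.append_assoc]
      · -- short final block: take s = whole list
        have hmin : ((x :: rs).take s).length = min s (x :: rs).length := List.length_take
        have hshort : (x :: rs).length < s := by omega
        have htake : (x :: rs).take s = x :: rs := List.take_of_length_le (by omega)
        have hdrop : (x :: rs).drop s = [] := List.drop_of_length_le (by omega)
        rw [fold_no_sep blockSize lineBlocks (x :: rs) i acc b (fun k hk => by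
          rw [Nat.add_assoc, hsabs]
          exact no_mid s i (k + 1) hdvd (by omega) (by omega))]
        show _ = acc ++ String.join (cfAltLoop (fuel + 1) (x :: rs) blockSize b lineBlocks)
        rw [cfAltLoop]
        simp only [h1, h2]
        have hcond : ¬ (((List.take s (x :: rs)).length : Int) = blockSize) := by
          rw [hcast]; exact_mod_cast hlen
        rw [if_neg hcond, htake, hdrop]
        have hnil : cfAltLoop fuel [] blockSize b lineBlocks = [] := by
          cases fuel <;> rfl
        rw [hnil, join_singleton]

-- ===== VERDICT (by name: the statement is the Claim_ definition above) =====
theorem cipherFormatter_spec : Claim_equal_cipherFormatter := by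
  intro cipher blockSize lineBlocks _ hpre
  unfold Spec_cipherFormatter
  by_cases hnil : cipher = []
  · subst hnil
    simp [cipherFormatter, cipherFormatter_alt, cfAltLoop, PySem.List.enumerate_nil, String.join]
  · have hb : 1 ≤ blockSize := by
      rcases hpre with h | ⟨h, _⟩
      · exact absurd h hnil
      · exact h
    rw [cipherFormatter_eq_foldl]
    have h0 : ((0 : Nat) : Int) = 0 := rfl
    have := fold_main blockSize lineBlocks hb cipher.length cipher 0 "" 0 le_rfl (dvd_zero _)
    rw [h0] at this
    rw [cipherFormatter_alt]
    rw [show PySem.List.enumerate cipher = PySem.List.enumerate cipher (0 : Int) from rfl]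
    rw [this, String.empty_append]
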